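-- pv_equiv track=rewrite | github.com/ckallum/Daily-Coding-Problem | solutions/#056.py | colourgraph
-- ===== SOURCE A (Python) =====
-- def colourgraph(graph, k, coloured={}):
--     if len(coloured) == len(graph):
--         return True
--
--     notcoloured = [row for row in range(len(graph)) if row not in coloured]
--     for vertex in notcoloured:
--         for colour in range(k):
--             coloured[vertex] = colour
--             if isvalid(graph, coloured, vertex, colour):
--                 if colourgraph(graph, k, coloured):
--                     return True
--             del coloured[vertex]
--     return False
--
-- def isvalid(graph, coloured, row, colour):
--     adjacent = [x for x in range(len(graph[row])) if graph[row][x] == 1]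
--     for coord in adjacent:
--         if coord in coloured:
--             if coloured[coord] == colour:
--                 return False
--     return True
-- ===== SOURCE B (Python) =====
-- def colourgraph(graph, k, coloured={}):
--     # Iterative explicit-stack search over immutable frames; A's recursive
--     # backtracking mutates `coloured` in place (and leaves it filled on True),
--     # B never mutates the caller's dict: equivalence is about the return value.
--     n = len(graph)
--     base = dict(coloured)
--     if len(base) == n:
--         return True
--     stack = [[base, [v for v in range(n) if v not in base], 0, 0]]
--     while stack:
--         col, verts, vi, ci = stack[-1]
--         if vi >= len(verts):
--             stack.pop()
--             continue
--         if ci >= k: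
--             stack[-1][2] = vi + 1
--             stack[-1][3] = 0
--             continue
--         v = verts[vi]
--         stack[-1][3] = ci + 1
--         child = dict(col)
--         child[v] = ci
--         if all(child.get(u) != ci for u, e in enumerate(graph[v]) if e == 1):
--             if len(child) == n:
--                 return True
--             stack.append([child, [w for w in range(n) if w not in child], 0, 0])
--     return False
-- ===== Notes on version B (the rewrite author's own statement) =====
-- stated objective: alternative
-- what changed: A's recursive backtracking that mutates one shared dict (and recomputes the uncoloured list per call) is replaced by an iterative explicit-stack search: a worklist of immutable frames (assignment, uncoloured vertices, vertex index, colour counter) stepped in a single while loop with no recursion and no mutation of the caller's dict.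
import Mathlib
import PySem

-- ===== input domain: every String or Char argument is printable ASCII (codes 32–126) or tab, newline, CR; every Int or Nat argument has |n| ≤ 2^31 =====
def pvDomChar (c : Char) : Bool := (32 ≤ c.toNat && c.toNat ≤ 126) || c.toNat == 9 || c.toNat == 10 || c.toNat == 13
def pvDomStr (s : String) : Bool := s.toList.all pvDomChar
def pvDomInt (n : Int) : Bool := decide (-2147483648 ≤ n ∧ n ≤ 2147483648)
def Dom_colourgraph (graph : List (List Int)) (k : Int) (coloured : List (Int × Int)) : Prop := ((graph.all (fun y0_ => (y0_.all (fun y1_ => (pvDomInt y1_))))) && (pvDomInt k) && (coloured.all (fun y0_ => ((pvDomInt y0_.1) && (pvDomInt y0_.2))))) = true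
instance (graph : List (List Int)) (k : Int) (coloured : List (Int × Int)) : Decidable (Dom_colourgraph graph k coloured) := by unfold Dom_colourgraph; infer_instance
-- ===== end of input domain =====

-- B replaces A's recursive backtracking (which mutates the shared dict `coloured` in place —
-- observably so when it returns True) by an iterative explicit-stack search over immutable
-- frames; the equivalence proved here is about the return value only.

-- ===== PORT A =====

-- shared small helper: the list `[row for row in range(len(graph)) if row not in coloured]`
def uncol (graph : List (List Int)) (col : PySem.Dict Int Int) : List Int :=
  (PySem.List.pyRange 0 (graph.length : Int) 1).filter (fun r => !(col.contains r))

-- termination helper for the ports (proved below the claim block would be illegal: the ports cite it)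
theorem uncol_insert_lt (graph : List (List Int)) (col : PySem.Dict Int Int) (v c : Int)
    (hv : v ∈ uncol graph col) :
    (uncol graph (col.insert v c)).length < (uncol graph col).length := by
  have hmono : ∀ r : Int,
      (!( (col.insert v c).contains r)) = true → (!(col.contains r)) = true := by
    intro r hr
    simp [PySem.Dict.contains_insert] at hr
    simp [hr.2]
  have hsub : List.Sublist (uncol graph (col.insert v c)) (uncol graph col) :=
    List.monotone_filter_right _ hmono
  refine Nat.lt_of_le_of_ne hsub.length_le ?_
  intro hlen
  have heq : uncol graph (col.insert v c) = uncol graph col := hsub.eq_of_length hlen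
  have : v ∈ uncol graph (col.insert v c) := heq ▸ hv
  have := List.of_mem_filter this
  simp [PySem.Dict.contains_insert_self] at this

def isvalid (graph : List (List Int)) (coloured : PySem.Dict Int Int) (row colour : Int) : Bool :=
  -- adjacent = [x for x in range(len(graph[row])) if graph[row][x] == 1]
  ((PySem.List.pyRange 0 (((PySem.List.pyGet? graph row).getD []).length : Int) 1).filter
      (fun x => PySem.List.pyGetD ((PySem.List.pyGet? graph row).getD []) x 0 == 1)).all
    (fun coord => !(coloured.contains coord && (coloured.getD coord 0 == colour)))

-- A's two nested `for` loops as index/counter recursion; the recursive call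
-- `colourgraph(graph, k, coloured)` is inlined as its 3-line body (base test, then loops).
def auxA (graph : List (List Int)) (k : Int) (col : PySem.Dict Int Int) (vi ci : Nat) : Bool :=
  if h : vi < (uncol graph col).length then
    if hci : (ci : Int) < k then
      (isvalid graph (col.insert ((uncol graph col)[vi]) (ci : Int)) ((uncol graph col)[vi]) (ci : Int) &&
        (if (col.insert ((uncol graph col)[vi]) (ci : Int)).size = graph.length then true
         else auxA graph k (col.insert ((uncol graph col)[vi]) (ci : Int)) 0 0)) ||
      auxA graph k col vi (ci + 1)
    else auxA graph k col (vi + 1) 0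
  else false
termination_by ((uncol graph col).length, (uncol graph col).length - vi, k.toNat - ci)
decreasing_by
  · exact Prod.Lex.left _ _ (uncol_insert_lt graph col _ _ (List.getElem_mem h))
  · exact Prod.Lex.right _ (Prod.Lex.right _ (Nat.sub_succ_lt_self _ _ (Int.lt_toNat.mpr hci)))
  · exact Prod.Lex.right _ (Prod.Lex.left _ _ (Nat.sub_succ_lt_self _ _ h))

def colourgraph (graph : List (List Int)) (k : Int) (coloured : List (Int × Int)) : Bool :=
  if (PySem.Dict.ofList coloured).size = graph.length then true
  else auxA graph k (PySem.Dict.ofList coloured) 0 0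

-- ===== PORT B =====

-- all(child.get(u) != ci for u, e in enumerate(graph[v]) if e == 1)
def validB (graph : List (List Int)) (child : PySem.Dict Int Int) (v colour : Int) : Bool :=
  ((PySem.List.enumerate ((PySem.List.pyGet? graph v).getD []) 0).filter (fun p => p.2 == 1)).all
    (fun p => child.get? p.1 != some colour)

-- stack-sum termination measure for the while loop
def phiB (graph : List (List Int)) (k : Int) :
    PySem.Dict Int Int × List Int × Nat × Nat → Nat
  | (col, verts, vi, ci) =>
    ((verts.length - vi) * (k.toNat + 1) - min ci k.toNat + 1) *
      (graph.length * (k.toNat + 1) + 2) ^ (uncol graph col).length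

def muB (graph : List (List Int)) (k : Int)
    (stack : List (PySem.Dict Int Int × List Int × Nat × Nat)) : Nat :=
  (stack.map (phiB graph k)).sum

theorem phiB_pos (graph : List (List Int)) (k : Int)
    (f : PySem.Dict Int Int × List Int × Nat × Nat) : 0 < phiB graph k f := by
  obtain ⟨col, verts, vi, ci⟩ := f
  simp only [phiB]
  exact Nat.mul_pos (Nat.succ_pos _) (Nat.pow_pos (Nat.succ_pos _))

theorem phiB_ci_lt (graph : List (List Int)) (k : Int) (col : PySem.Dict Int Int)
    (verts : List Int) (vi ci : Nat) (h : vi < verts.length) (hci : (ci : Int) < k) :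
    phiB graph k (col, verts, vi, ci + 1) < phiB graph k (col, verts, vi, ci) := by
  have hciK : ci < k.toNat := Int.lt_toNat.mpr hci
  simp only [phiB]
  apply (Nat.mul_lt_mul_right (Nat.pow_pos (Nat.succ_pos _))).mpr
  rw [Nat.min_eq_left hciK, Nat.min_eq_left (Nat.le_of_lt hciK)]
  have hX : ci + 1 ≤ (verts.length - vi) * (k.toNat + 1) :=
    le_trans (Nat.le_succ_of_le hciK) (Nat.le_mul_of_pos_left _ (Nat.sub_pos_of_lt h))
  exact Nat.succ_lt_succ (Nat.sub_succ_lt_self _ _ (Nat.lt_of_succ_le hX))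

theorem phiB_vi_lt (graph : List (List Int)) (k : Int) (col : PySem.Dict Int Int)
    (verts : List Int) (vi ci : Nat) (h : vi < verts.length) :
    phiB graph k (col, verts, vi + 1, 0) < phiB graph k (col, verts, vi, ci) := by
  simp only [phiB]
  apply (Nat.mul_lt_mul_right (Nat.pow_pos (Nat.succ_pos _))).mpr
  rw [Nat.zero_min, Nat.sub_zero]
  have hmin : min ci k.toNat ≤ k.toNat := Nat.min_le_right _ _
  have hsplit : (verts.length - vi) * (k.toNat + 1)
      = (verts.length - (vi + 1)) * (k.toNat + 1) + (k.toNat + 1) := by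
    have h1 : verts.length - vi = (verts.length - (vi + 1)) + 1 := by
      rw [← Nat.sub_sub]
      have hpos : 1 ≤ verts.length - vi := Nat.sub_pos_of_lt h
      exact (Nat.sub_add_cancel hpos).symm
    rw [h1, Nat.succ_mul]
  rw [hsplit, Nat.add_sub_assoc (Nat.le_succ_of_le hmin)]
  exact Nat.succ_lt_succ
    (Nat.lt_add_of_pos_right (Nat.sub_pos_of_lt (Nat.lt_succ_of_le hmin)))

theorem phiB_push_lt (graph : List (List Int)) (k : Int) (col child : PySem.Dict Int Int)
    (verts : List Int) (vi ci : Nat) (h : vi < verts.length) (hci : (ci : Int) < k)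
    (hg : (uncol graph child).length < (uncol graph col).length) :
    phiB graph k (child, uncol graph child, 0, 0) + phiB graph k (col, verts, vi, ci + 1)
      < phiB graph k (col, verts, vi, ci) := by
  have hciK : ci < k.toNat := Int.lt_toNat.mpr hci
  have hgcn : (uncol graph child).length ≤ graph.length := by
    have h1 : (uncol graph child).length
        ≤ (PySem.List.pyRange 0 (graph.length : Int) 1).length := List.length_filter_le _ _
    rw [PySem.List.length_pyRange_one, Int.sub_zero, Int.toNat_natCast] at h1
    exact h1
  simp only [phiB]
  set K := k.toNat with hK
  set W := graph.length * (K + 1) + 2 with hW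
  set g := (uncol graph col).length
  set gc := (uncol graph child).length
  simp only [Nat.sub_zero, Nat.zero_min]
  rw [Nat.min_eq_left hciK, Nat.min_eq_left (Nat.le_of_lt hciK)]
  have hX : ci + 1 ≤ (verts.length - vi) * (K + 1) :=
    le_trans (Nat.le_succ_of_le hciK) (Nat.le_mul_of_pos_left _ (Nat.sub_pos_of_lt h))
  -- the pushed frame is strictly below one unit W ^ g
  have hchild : (gc * (K + 1) + 1) * W ^ gc < W ^ g := by
    have h2 : gc * (K + 1) + 1 ≤ W - 1 := by
      rw [hW, show (2 : Nat) = 1 + 1 from rfl, ← Nat.add_assoc, Nat.add_sub_cancel]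
      exact Nat.succ_le_succ (Nat.mul_le_mul_right (K + 1) hgcn)
    calc (gc * (K + 1) + 1) * W ^ gc
        ≤ (W - 1) * W ^ gc := Nat.mul_le_mul_right _ h2
      _ < W * W ^ gc := (Nat.mul_lt_mul_right (Nat.pow_pos (Nat.succ_pos _))).mpr (Nat.sub_lt (Nat.succ_pos _) Nat.one_pos)
      _ = W ^ (gc + 1) := by rw [pow_succ, Nat.mul_comm]
      _ ≤ W ^ g := Nat.pow_le_pow_right (Nat.le_add_left _ _) hg
  have hpar : ((verts.length - vi) * (K + 1) - (ci + 1) + 1) * W ^ g + W ^ g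
      ≤ ((verts.length - vi) * (K + 1) - ci + 1) * W ^ g := by
    have h3 : (verts.length - vi) * (K + 1) - (ci + 1) + 1
        = (verts.length - vi) * (K + 1) - ci := by
      rw [← Nat.sub_sub]
      have hlt : ci < (verts.length - vi) * (K + 1) := Nat.lt_of_succ_le hX
      have hpos : 1 ≤ (verts.length - vi) * (K + 1) - ci := Nat.sub_pos_of_lt hlt
      exact Nat.sub_add_cancel hpos
    refine le_of_eq ?_
    calc ((verts.length - vi) * (K + 1) - (ci + 1) + 1) * W ^ g + W ^ g
        = (((verts.length - vi) * (K + 1) - (ci + 1) + 1) + 1) * W ^ g := by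
          rw [Nat.succ_mul ((verts.length - vi) * (K + 1) - (ci + 1) + 1) (W ^ g)]
      _ = ((verts.length - vi) * (K + 1) - ci + 1) * W ^ g := by rw [h3]
  calc (gc * (K + 1) + 1) * W ^ gc
        + ((verts.length - vi) * (K + 1) - (ci + 1) + 1) * W ^ g
      < W ^ g + ((verts.length - vi) * (K + 1) - (ci + 1) + 1) * W ^ g :=
        Nat.add_lt_add_right hchild _
    _ = ((verts.length - vi) * (K + 1) - (ci + 1) + 1) * W ^ g + W ^ g :=
        Nat.add_comm _ _
    _ ≤ ((verts.length - vi) * (K + 1) - ci + 1) * W ^ g := hpar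

theorem muB_pop (graph : List (List Int)) (k : Int)
    (f : PySem.Dict Int Int × List Int × Nat × Nat)
    (rest : List (PySem.Dict Int Int × List Int × Nat × Nat)) :
    muB graph k rest < muB graph k (f :: rest) := by
  simp only [muB, List.map_cons, List.sum_cons]
  exact Nat.lt_add_of_pos_left (phiB_pos graph k f)

theorem muB_step (graph : List (List Int)) (k : Int)
    (f g : PySem.Dict Int Int × List Int × Nat × Nat)
    (rest : List (PySem.Dict Int Int × List Int × Nat × Nat))
    (h : phiB graph k g < phiB graph k f) :
    muB graph k (g :: rest) < muB graph k (f :: rest) := by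
  simp only [muB, List.map_cons, List.sum_cons]
  exact Nat.add_lt_add_right h _

theorem muB_push (graph : List (List Int)) (k : Int)
    (c p f : PySem.Dict Int Int × List Int × Nat × Nat)
    (rest : List (PySem.Dict Int Int × List Int × Nat × Nat))
    (h : phiB graph k c + phiB graph k p < phiB graph k f) :
    muB graph k (c :: p :: rest) < muB graph k (f :: rest) := by
  simp only [muB, List.map_cons, List.sum_cons]
  rw [← Nat.add_assoc]
  exact Nat.add_lt_add_right h _

-- the `while stack:` loop; each frame is (col, verts, vi, ci)
def runB (graph : List (List Int)) (k : Int) :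
    List (PySem.Dict Int Int × List Int × Nat × Nat) → Bool
  | [] => false
  | (col, verts, vi, ci) :: rest =>
    if h : vi < verts.length then
      if hci : (ci : Int) < k then
        if validB graph (col.insert (verts[vi]) (ci : Int)) (verts[vi]) (ci : Int) then
          if (col.insert (verts[vi]) (ci : Int)).size = graph.length then true
          else
            -- the `hg` test is a pure totality guard: it always holds on stacks reachable
            -- from colourgraph_alt's initial stack (proved in run_eq below)
            if hg : (uncol graph (col.insert (verts[vi]) (ci : Int))).length < (uncol graph col).length then
              runB graph k ((col.insert (verts[vi]) (ci : Int),
                              uncol graph (col.insert (verts[vi]) (ci : Int)), 0, 0) ::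
                            (col, verts, vi, ci + 1) :: rest)
            else runB graph k ((col, verts, vi, ci + 1) :: rest)
        else runB graph k ((col, verts, vi, ci + 1) :: rest)
      else runB graph k ((col, verts, vi + 1, 0) :: rest)
    else runB graph k rest
termination_by stack => muB graph k stack
decreasing_by
  · exact muB_push graph k _ _ _ rest
      (phiB_push_lt graph k col (col.insert (verts[vi]) (ci : Int)) verts vi ci h hci hg)
  · exact muB_step graph k _ _ rest (phiB_ci_lt graph k col verts vi ci h hci)
  · exact muB_step graph k _ _ rest (phiB_ci_lt graph k col verts vi ci h hci)
  · exact muB_step graph k _ _ rest (phiB_vi_lt graph k col verts vi ci h)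
  · exact muB_pop graph k _ rest

def colourgraph_alt (graph : List (List Int)) (k : Int) (coloured : List (Int × Int)) : Bool :=
  if (PySem.Dict.ofList coloured).size = graph.length then true
  else runB graph k [(PySem.Dict.ofList coloured, uncol graph (PySem.Dict.ofList coloured), 0, 0)]

-- ===== PRECONDITION & SPEC =====
def Spec_colourgraph (graph : List (List Int)) (k : Int) (coloured : List (Int × Int)) (out : Bool) : Prop := out = colourgraph_alt graph k coloured
instance (graph : List (List Int)) (k : Int) (coloured : List (Int × Int)) (out : Bool) : Decidable (Spec_colourgraph graph k coloured out) := by unfold Spec_colourgraph; infer_instance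

-- ===== CLAIM (what is proved, stated in full; the proofs are below) =====
def Claim_equal_colourgraph : Prop := ∀ (graph : List (List Int)) (k : Int) (coloured : List (Int × Int)), Dom_colourgraph graph k coloured → Spec_colourgraph graph k coloured (colourgraph graph k coloured)

-- ===== LEMMAS AND PROOFS =====

theorem lookup_ne (d : PySem.Dict Int Int) (j colour : Int) :
    (d.get? j != some colour) = !(d.contains j && (d.getD j 0 == colour)) := by
  rw [PySem.Dict.contains_eq_isSome_get?, PySem.Dict.getD_eq_get?_getD]
  cases h : d.get? j <;> simp [bne]

theorem valid_eq (graph : List (List Int)) (d : PySem.Dict Int Int) (row colour : Int) :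
    validB graph d row colour = isvalid graph d row colour := by
  unfold validB isvalid
  rw [PySem.List.enumerate_eq_map_pyRange _ 0]
  simp only [PySem.List.len_eq, List.filter_map, List.all_map, Function.comp_def, lookup_ne]

theorem auxA_none (graph : List (List Int)) (k : Int) (col : PySem.Dict Int Int) (vi ci : Nat)
    (h : ¬ vi < (uncol graph col).length) : auxA graph k col vi ci = false := by
  rw [auxA.eq_def]
  simp [h]

theorem auxA_nok (graph : List (List Int)) (k : Int) (col : PySem.Dict Int Int) (vi ci : Nat)
    (h : vi < (uncol graph col).length) (hci : ¬ (ci : Int) < k) :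
    auxA graph k col vi ci = auxA graph k col (vi + 1) 0 := by
  rw [auxA.eq_def]
  simp [h, hci]

theorem auxA_succ (graph : List (List Int)) (k : Int) (col : PySem.Dict Int Int) (vi ci : Nat)
    (h : vi < (uncol graph col).length) (hci : (ci : Int) < k) :
    auxA graph k col vi ci =
      ((isvalid graph (col.insert ((uncol graph col)[vi]) (ci : Int)) ((uncol graph col)[vi]) (ci : Int) &&
        (if (col.insert ((uncol graph col)[vi]) (ci : Int)).size = graph.length then true
         else auxA graph k (col.insert ((uncol graph col)[vi]) (ci : Int)) 0 0)) ||
       auxA graph k col vi (ci + 1)) := by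
  rw [auxA.eq_def]
  simp [h, hci]

theorem run_eq (graph : List (List Int)) (k : Int) :
    ∀ (stack : List (PySem.Dict Int Int × List Int × Nat × Nat)),
    (∀ f ∈ stack, f.2.1 = uncol graph f.1) →
    runB graph k stack =
      (stack.map (fun f => auxA graph k f.1 f.2.2.1 f.2.2.2)).foldr (· || ·) false := by
  intro stack
  induction stack using runB.induct graph k with
  | case1 => intro _; simp [runB]
  | case2 col verts vi ci rest h hci hvalid hsize =>
    intro hinv
    have hv : verts = uncol graph col := hinv (col, verts, vi, ci) (by simp)
    subst hv
    rw [valid_eq] at hvalid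
    rw [runB.eq_2]
    simp only [dif_pos h, dif_pos hci]
    rw [valid_eq]
    simp only [List.map_cons, List.foldr_cons]
    rw [auxA_succ graph k col vi ci h hci]
    simp [hvalid, hsize]
  | case3 col verts vi ci rest h hci hvalid hsize hg ih =>
    intro hinv
    have hv : verts = uncol graph col := hinv (col, verts, vi, ci) (by simp)
    subst hv
    have hinv' : ∀ f ∈ (col.insert ((uncol graph col)[vi]) (ci : Int),
        uncol graph (col.insert ((uncol graph col)[vi]) (ci : Int)), 0, 0) ::
        (col, uncol graph col, vi, ci + 1) :: rest, f.2.1 = uncol graph f.1 := by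
      intro f hf
      simp only [List.mem_cons] at hf
      rcases hf with hf | hf | hf
      · simp [hf]
      · simp [hf]
      · exact hinv _ (List.mem_cons_of_mem _ hf)
    rw [valid_eq] at hvalid
    rw [runB.eq_2]
    simp only [dif_pos h, dif_pos hci]
    rw [valid_eq]
    simp only [hvalid, if_true, if_neg hsize, dif_pos hg]
    rw [ih hinv']
    simp only [List.map_cons, List.foldr_cons]
    rw [auxA_succ graph k col vi ci h hci]
    simp [hvalid, hsize, Bool.or_assoc]
  | case4 col verts vi ci rest h hci hvalid hsize hg ih =>
    intro hinv
    have hv : verts = uncol graph col := hinv (col, verts, vi, ci) (by simp)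
    subst hv
    exact absurd (uncol_insert_lt graph col _ _ (List.getElem_mem h)) hg
  | case5 col verts vi ci rest h hci hvalid ih =>
    intro hinv
    have hv : verts = uncol graph col := hinv (col, verts, vi, ci) (by simp)
    subst hv
    have hinv' : ∀ f ∈ (col, uncol graph col, vi, ci + 1) :: rest,
        f.2.1 = uncol graph f.1 := by
      intro f hf
      simp only [List.mem_cons] at hf
      rcases hf with hf | hf
      · simp [hf]
      · exact hinv _ (List.mem_cons_of_mem _ hf)
    rw [valid_eq] at hvalid
    rw [runB.eq_2]
    simp only [dif_pos h, dif_pos hci]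
    rw [valid_eq]
    simp only [Bool.not_eq_true] at hvalid
    simp only [hvalid, Bool.false_eq_true, if_false]
    rw [ih hinv']
    simp only [List.map_cons, List.foldr_cons]
    rw [auxA_succ graph k col vi ci h hci]
    simp [hvalid]
  | case6 col verts vi ci rest h hci ih =>
    intro hinv
    have hv : verts = uncol graph col := hinv (col, verts, vi, ci) (by simp)
    subst hv
    have hinv' : ∀ f ∈ (col, uncol graph col, vi + 1, 0) :: rest,
        f.2.1 = uncol graph f.1 := by
      intro f hf
      simp only [List.mem_cons] at hf
      rcases hf with hf | hf
      · simp [hf]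
      · exact hinv _ (List.mem_cons_of_mem _ hf)
    rw [runB.eq_2]
    simp only [dif_pos h, dif_neg hci]
    rw [ih hinv']
    simp only [List.map_cons, List.foldr_cons]
    rw [auxA_nok graph k col vi ci h hci]
  | case7 col verts vi ci rest h ih =>
    intro hinv
    have hv : verts = uncol graph col := hinv (col, verts, vi, ci) (by simp)
    subst hv
    rw [runB.eq_2]
    simp only [dif_neg h]
    rw [ih (fun f hf => hinv _ (List.mem_cons_of_mem _ hf))]
    simp only [List.map_cons, List.foldr_cons]
    rw [auxA_none graph k col vi ci h]
    simp

-- ===== VERDICT (by name: the statement is the Claim_ definition above) =====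
theorem colourgraph_spec : Claim_equal_colourgraph := by
  intro graph k coloured _
  unfold Spec_colourgraph colourgraph colourgraph_alt
  split
  · rfl
  · rw [run_eq graph k _ (by intro f hf; simp at hf; subst hf; rfl)]
    simp
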